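-- pv_equiv track=rewrite | github.com/danish-stance-detectors/Stance | src/classes/FeatureExtractor.py | special_words_in_text
-- ===== SOURCE A (Python) =====
-- def special_words_in_text(text, swear_words, negation_words):
--     split_text = text.split(" ")
--
--     swear_count = 0
--     negation_count = 0
--     for word in split_text:
--         w = word.strip().lower()
--         if w in swear_words:
--             swear_count += 1
--
--         if w in negation_words:
--             negation_count += 1
--
--     return [swear_count, negation_count]
-- ===== SOURCE B (Python) =====
-- def special_words_in_text(text, swear_words, negation_words):
--     freq = {}
--     for word in text.split(" "):
--         w = word.strip().lower()
--         freq[w] = freq.get(w, 0) + 1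
--     swear_count = sum(freq.get(w, 0) for w in set(swear_words))
--     negation_count = sum(freq.get(w, 0) for w in set(negation_words))
--     return [swear_count, negation_count]
-- ===== Notes on version B (the rewrite author's own statement) =====
-- stated objective: idiomatic
-- what changed: Builds a frequency table of normalized tokens in one pass, then sums the counts of the (deduplicated) swear and negation words, instead of testing each token's membership in both word lists.
import Mathlib
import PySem

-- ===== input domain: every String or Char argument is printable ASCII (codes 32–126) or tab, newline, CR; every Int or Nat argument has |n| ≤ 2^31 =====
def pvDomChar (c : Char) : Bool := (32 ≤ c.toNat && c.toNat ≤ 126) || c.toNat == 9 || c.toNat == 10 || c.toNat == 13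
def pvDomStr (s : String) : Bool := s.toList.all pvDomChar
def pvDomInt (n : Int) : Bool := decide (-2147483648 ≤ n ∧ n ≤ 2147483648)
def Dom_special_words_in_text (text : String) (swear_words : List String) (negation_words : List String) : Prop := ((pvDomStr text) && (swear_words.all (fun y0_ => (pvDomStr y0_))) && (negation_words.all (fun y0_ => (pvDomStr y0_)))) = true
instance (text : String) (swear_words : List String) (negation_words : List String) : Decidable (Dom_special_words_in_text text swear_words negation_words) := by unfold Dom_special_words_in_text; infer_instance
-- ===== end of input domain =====

-- B builds a frequency table of the normalized tokens once, then sums the counts of the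
-- deduplicated swear/negation words, instead of testing each token's membership in both lists.

-- ===== PORT A =====
def special_words_in_text (text : String) (swear_words : List String) (negation_words : List String) : List Int :=
  let split_text := (PySem.Str.split? text " ").getD []  -- sep is the literal " " ≠ "", so split? is always some
  let r := split_text.foldl (fun (p : Int × Int) word =>
    let w := PySem.Str.lower (PySem.Str.strip word)
    ((if swear_words.contains w then p.1 + 1 else p.1),
     (if negation_words.contains w then p.2 + 1 else p.2))) (0, 0)
  [r.1, r.2]

-- ===== PORT B =====
def special_words_in_text_alt (text : String) (swear_words : List String) (negation_words : List String) : List Int :=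
  let freq : PySem.Dict String Int := ((PySem.Str.split? text " ").getD []).foldl
    (fun d word =>
      let w := PySem.Str.lower (PySem.Str.strip word)
      d.insert w (d.getD w 0 + 1)) PySem.Dict.empty
  let swear_count := ((PySem.Set.ofList swear_words).map (fun w => freq.getD w 0)).sum
  let negation_count := ((PySem.Set.ofList negation_words).map (fun w => freq.getD w 0)).sum
  [swear_count, negation_count]

-- ===== PRECONDITION & SPEC =====
def Spec_special_words_in_text (text : String) (swear_words : List String) (negation_words : List String) (out : List Int) : Prop := out = special_words_in_text_alt text swear_words negation_words
instance (text : String) (swear_words : List String) (negation_words : List String) (out : List Int) : Decidable (Spec_special_words_in_text text swear_words negation_words out) := by unfold Spec_special_words_in_text; infer_instance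

-- ===== CLAIM (what is proved, stated in full; the proofs are below) =====
def Claim_equal_special_words_in_text : Prop := ∀ (text : String) (swear_words : List String) (negation_words : List String), Dom_special_words_in_text text swear_words negation_words → Spec_special_words_in_text text swear_words negation_words (special_words_in_text text swear_words negation_words)

-- ===== LEMMAS AND PROOFS =====

/-- A's pair fold over the tokens is a pair of `countP`s, by induction generalizing the accumulator. -/
theorem pairFold_eq_countP (ts : List String) (sw nw : List String) (a b : Int) :
    ts.foldl (fun (p : Int × Int) w =>
      ((if sw.contains w then p.1 + 1 else p.1),
       (if nw.contains w then p.2 + 1 else p.2))) (a, b)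
    = (a + (ts.countP (sw.contains ·) : Int), b + (ts.countP (nw.contains ·) : Int)) := by
  induction ts generalizing a b with
  | nil => simp
  | cons t ts ih =>
    simp only [List.foldl_cons, List.countP_cons, ih]
    rw [Prod.mk.injEq]
    constructor <;> split <;> push_cast <;> ring

/-- The sum of a 0/1 indicator over a duplicate-free list is 1 or 0 by membership. -/
theorem indicator_sum {t : String} (l : List String) (hl : l.Nodup) :
    (l.map (fun w => if t = w then (1:Int) else 0)).sum = if t ∈ l then 1 else 0 := by
  induction l with
  | nil => simp
  | cons a l ih =>
    simp only [List.map_cons, List.sum_cons, List.nodup_cons] at *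
    rcases hl with ⟨ha, hl⟩
    rw [ih hl]
    by_cases h : t = a
    · subst h; simp [ha]
    · simp [h]

/-- Summing `ts.count w` over the distinct elements of `ws` counts the tokens that lie in `ws`. -/
theorem sum_counts_over_set (ws ts : List String) :
    ((PySem.Set.ofList ws).map (fun w => (ts.count w : Int))).sum
      = (ts.countP (ws.contains ·) : Int) := by
  induction ts with
  | nil => simp
  | cons t ts ih =>
    simp only [List.count_cons, List.countP_cons]
    have hsplit : ((PySem.Set.ofList ws).map (fun w => ((ts.count w + if t == w then 1 else 0 : Nat) : Int))).sum
        = ((PySem.Set.ofList ws).map (fun w => (ts.count w : Int))).sum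
          + ((PySem.Set.ofList ws).map (fun w => (if t = w then (1:Int) else 0))).sum := by
      rw [List.map_congr_left
            (g := fun w => (ts.count w : Int) + (if t = w then (1:Int) else 0))
            (fun w _ => by by_cases h : t = w <;> simp [h]),
          List.sum_map_add]
    have hnd := PySem.Set.nodup_ofList (xs := ws)
    have hmem : t ∈ PySem.Set.ofList ws ↔ ws.contains t = true := by
      simp [PySem.Set.mem_ofList]
    rw [hsplit, ih, indicator_sum _ hnd]
    by_cases hc : ws.contains t = true <;>
      simp only [hmem, hc, if_true] <;> push_cast <;> ring

/-- The ports' bodies agree, over an arbitrary token list (let-free form, defeq to the ports). -/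
theorem main_eq (toks sw nw : List String) :
    [(toks.foldl (fun (p : Int × Int) word =>
        ((if sw.contains (PySem.Str.lower (PySem.Str.strip word)) then p.1 + 1 else p.1),
         (if nw.contains (PySem.Str.lower (PySem.Str.strip word)) then p.2 + 1 else p.2))) (0, 0)).1,
     (toks.foldl (fun (p : Int × Int) word =>
        ((if sw.contains (PySem.Str.lower (PySem.Str.strip word)) then p.1 + 1 else p.1),
         (if nw.contains (PySem.Str.lower (PySem.Str.strip word)) then p.2 + 1 else p.2))) (0, 0)).2]
    = [((PySem.Set.ofList sw).map (fun w =>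
          (toks.foldl (fun (d : PySem.Dict String Int) word =>
            d.insert (PySem.Str.lower (PySem.Str.strip word))
              (d.getD (PySem.Str.lower (PySem.Str.strip word)) 0 + 1)) PySem.Dict.empty).getD w 0)).sum,
       ((PySem.Set.ofList nw).map (fun w =>
          (toks.foldl (fun (d : PySem.Dict String Int) word =>
            d.insert (PySem.Str.lower (PySem.Str.strip word))
              (d.getD (PySem.Str.lower (PySem.Str.strip word)) 0 + 1)) PySem.Dict.empty).getD w 0)).sum] := by
  have hpair := pairFold_eq_countP (toks.map (fun word => PySem.Str.lower (PySem.Str.strip word))) sw nw 0 0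
  rw [List.foldl_map] at hpair
  have hdict : toks.foldl (fun (d : PySem.Dict String Int) word =>
      d.insert (PySem.Str.lower (PySem.Str.strip word))
        (d.getD (PySem.Str.lower (PySem.Str.strip word)) 0 + 1)) PySem.Dict.empty
      = PySem.Dict.counter (toks.map (fun word => PySem.Str.lower (PySem.Str.strip word))) := by
    rw [← PySem.Dict.foldl_insert_getD_add_one_eq_counter, List.foldl_map]
  rw [hpair, hdict]
  congr 1
  · rw [List.map_congr_left (fun w _ => PySem.Dict.getD_counter _ _), sum_counts_over_set]
    simp
  · rw [List.map_congr_left (fun w _ => PySem.Dict.getD_counter _ _), sum_counts_over_set]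
    simp

-- ===== VERDICT (by name: the statement is the Claim_ definition above) =====
theorem special_words_in_text_spec : Claim_equal_special_words_in_text := by
  intro text sw nw _
  exact main_eq ((PySem.Str.split? text " ").getD []) sw nw
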